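-- pv_equiv track=rewrite | github.com/SampsonFox/Paper_Test_CNOM | Question_1_v2.py | BooleanExample
-- ===== SOURCE A (Python) =====
-- def BooleanExample(a_str,b_str):
--     '''递归操作判断两个给定字符串a和b的第一个字符是否相等'''
--     a = []
--     b = []
--     for i in a_str:
--         a.append(i)
--     for n in b_str:
--         b.append(n)
--
--     if len(a) != len(b):
--         return False
--
--     for x in range(len(b)):
--         #判断字符串a的第一个字符和字符串b的第一个字符是否相等
--         if a[0] == b[0]:
--             a.pop(0)
--             b.pop(0)
--             return BooleanExample(a,b)
--
--     #判断字符串b有没有剩余的元素，如果有，说明b和a不完全相等返回False，反之亦然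
--     return len(b) == 0
-- ===== SOURCE B (Python) =====
-- def BooleanExample(a_str, b_str):
--     a = []
--     b = []
--     for i in a_str:
--         a.append(i)
--     for n in b_str:
--         b.append(n)
--     if len(a) != len(b):
--         return False
--     for i in range(len(a)):
--         if a[i] != b[i]:
--             return False
--     return True
-- ===== Notes on version B (the rewrite author's own statement) =====
-- stated objective: faster
-- what changed: Replaced A's per-character tail recursion (which re-materializes both lists, pops the heads with O(n) pop(0) and recurses, re-checking lengths each call) with a single explicit index loop comparing a[i] to b[i] after one length check.
import Mathlib
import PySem

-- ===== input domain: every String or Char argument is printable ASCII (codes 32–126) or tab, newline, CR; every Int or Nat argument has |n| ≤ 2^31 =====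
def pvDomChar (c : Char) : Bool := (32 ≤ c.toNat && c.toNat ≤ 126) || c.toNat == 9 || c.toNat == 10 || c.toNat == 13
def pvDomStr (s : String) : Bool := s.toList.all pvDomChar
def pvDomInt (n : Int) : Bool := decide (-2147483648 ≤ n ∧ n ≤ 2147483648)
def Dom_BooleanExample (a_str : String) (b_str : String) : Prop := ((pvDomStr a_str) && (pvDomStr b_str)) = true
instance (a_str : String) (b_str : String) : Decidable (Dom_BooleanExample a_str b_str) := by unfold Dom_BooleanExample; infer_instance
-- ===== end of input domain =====

-- B replaces A's per-character tail recursion with one index loop over the two lists; objective: simpler.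

-- ===== PORT A =====
-- A's recursive body, on the materialized character lists.
-- The `for x in range(len(b))` loop either returns on its FIRST iteration
-- (when a[0] == b[0], popping both heads and recursing) or its condition is
-- false on every iteration, falling through to `return len(b) == 0`; that is
-- exactly the match below.
def BooleanExampleGoA : List Char → List Char → Bool
  | a, b =>
    if a.length ≠ b.length then false
    else
      match a, b with
      | x :: xs, y :: ys =>
          if x == y then BooleanExampleGoA xs ys
          else decide ((y :: ys).length = 0)   -- loop falls through: return len(b) == 0
      | _, _ => decide (b.length = 0)          -- empty b: loop body never runs
  termination_by a _ => a.length

def BooleanExample (a_str : String) (b_str : String) : Bool :=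
  BooleanExampleGoA a_str.toList b_str.toList  -- the two for-loops materialize the strings into lists

-- ===== PORT B =====
-- `for i in range(len(a)): if a[i] != b[i]: return False` / `return True`
def BooleanExampleLoopB (a b : List Char) (i : Nat) : Bool :=
  if _h : i < a.length then
    if a.getD i ' ' ≠ b.getD i ' ' then false
    else BooleanExampleLoopB a b (i + 1)
  else true
  termination_by a.length - i

def BooleanExample_alt (a_str : String) (b_str : String) : Bool :=
  let a := a_str.toList
  let b := b_str.toList
  if a.length ≠ b.length then false
  else BooleanExampleLoopB a b 0

-- ===== PRECONDITION & SPEC =====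
def Spec_BooleanExample (a_str : String) (b_str : String) (out : Bool) : Prop := out = BooleanExample_alt a_str b_str
instance (a_str : String) (b_str : String) (out : Bool) : Decidable (Spec_BooleanExample a_str b_str out) := by unfold Spec_BooleanExample; infer_instance

-- ===== CLAIM (what is proved, stated in full; the proofs are below) =====
def Claim_equal_BooleanExample : Prop := ∀ (a_str : String) (b_str : String), Dom_BooleanExample a_str b_str → Spec_BooleanExample a_str b_str (BooleanExample a_str b_str)

-- ===== LEMMAS AND PROOFS =====

theorem goA_eq_beq (a b : List Char) : BooleanExampleGoA a b = (a == b) := by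
  induction a generalizing b with
  | nil =>
      cases b <;> simp [BooleanExampleGoA]
  | cons x xs ih =>
      cases b with
      | nil => simp [BooleanExampleGoA]
      | cons y ys =>
          rw [BooleanExampleGoA]
          by_cases hlen : (x :: xs).length = (y :: ys).length
          · simp only [hlen, ne_eq, not_true_eq_false, if_false]
            by_cases hxy : x = y
            · simp [hxy, ih]
            · have hb : (x == y) = false := by simp [hxy]
              simp [hb]
          · simp only [hlen, ne_eq, not_false_eq_true, if_true, List.cons_beq_cons]
            symm
            rw [Bool.and_eq_false_iff]
            by_cases hxy : x = y
            · right
              rw [beq_eq_false_iff_ne]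
              intro h
              exact hlen (by simp [hxy, h])
            · left; simp [hxy]

theorem loopB_eq_drop (a b : List Char) (hlen : a.length = b.length) (i : Nat) :
    BooleanExampleLoopB a b i = (a.drop i == b.drop i) := by
  by_cases h : i < a.length
  · have hb : i < b.length := hlen ▸ h
    have key : (a.drop i == b.drop i) = ((a[i] == b[i]) && (a.drop (i + 1) == b.drop (i + 1))) := by
      rw [List.drop_eq_getElem_cons h, List.drop_eq_getElem_cons hb, List.cons_beq_cons]
    rw [BooleanExampleLoopB, dif_pos h, key,
        List.getD_eq_getElem a ' ' h, List.getD_eq_getElem b ' ' hb]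
    by_cases heq : a[i] = b[i]
    · rw [if_neg (by simp [heq]), loopB_eq_drop a b hlen (i + 1), heq]
      simp
    · rw [if_pos (by simp [heq])]
      simp [heq]
  · have ha : a.drop i = [] := List.drop_eq_nil_of_le (by omega)
    have hbn : b.drop i = [] := List.drop_eq_nil_of_le (by omega)
    rw [BooleanExampleLoopB]
    simp [h, ha, hbn]
  termination_by a.length - i

theorem alt_eq_beq (a_str b_str : String) :
    BooleanExample_alt a_str b_str = (a_str.toList == b_str.toList) := by
  unfold BooleanExample_alt
  by_cases hlen : a_str.toList.length = b_str.toList.length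
  · simp only [hlen, ne_eq, not_true_eq_false, if_false]
    rw [loopB_eq_drop _ _ hlen 0]
    simp
  · have : (a_str.toList == b_str.toList) = false := by
      rw [beq_eq_false_iff_ne]
      intro h; exact hlen (by rw [h])
    simp_all

-- ===== VERDICT (by name: the statement is the Claim_ definition above) =====
theorem BooleanExample_spec : Claim_equal_BooleanExample := by
  intro a_str b_str _
  unfold Spec_BooleanExample BooleanExample
  rw [goA_eq_beq, alt_eq_beq]
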